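-- pv_equiv track=rewrite | github.com/nobleschools/contact-note-utils | break_contact_notes.py | get_endpoints_of_duplicate_columns
-- ===== SOURCE A (Python) =====
-- def get_endpoints_of_duplicate_columns(header_row_list):
--     """Gets the endpoints of the first set of duplicate columns.
--
--     The positions of the first set of duplicate columns in the input file will be used while iterating through
--     the output file, as well as to judge how long each row will be. Therefore it's important they these
--     endpoints are calculated early.
--
--     Args:
--         header_row_list: A list of strings that are the names of the header rows in the input file.
--
--     Returns:
--         duplicate_col_start and duplicate_col_end, two integers that represent both the start and end
--         of the first set of duplicate columns in the input file.
--     """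
--     column_index = 0
--     duplicate_col_start = 0
--     duplicate_col_end = 0
--     duplicate_col_dict = {}
--     for header in header_row_list:
--         if header not in duplicate_col_dict:
--             duplicate_col_dict[header] = column_index
--             column_index += 1
--         else:
--             duplicate_col_start = duplicate_col_dict[header]
--             duplicate_col_end = column_index - 1
--             break
--     return duplicate_col_start, duplicate_col_end
-- ===== SOURCE B (Python) =====
-- def get_endpoints_of_duplicate_columns(header_row_list):
--     """Return (start, end) of the first set of duplicate columns, (0, 0) if none.
--
--     Sort the (index, header) pairs by (header, index); duplicate headers become
--     adjacent, with their occurrences in index order.  Among all adjacent pairs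
--     with equal headers, the one whose second index is smallest is the first
--     duplicate in the file: its first index is the start column and its second
--     index minus one is the end column.
--     """
--     pairs = sorted(enumerate(header_row_list), key=lambda p: (p[1], p[0]))
--     best = None
--     for (i, h), (j, g) in zip(pairs, pairs[1:]):
--         if h == g and (best is None or j < best[1]):
--             best = (i, j)
--     if best is None:
--         return 0, 0
--     return best[0], best[1] - 1
-- ===== Notes on version B (the rewrite author's own statement) =====
-- stated objective: alternative
-- what changed: Replaced the single-pass dict-of-first-indices loop with a sort-based algorithm: sort the (index, header) pairs by (header, index) so equal headers become adjacent, then select the adjacent equal-header pair with the smallest second index.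
import Mathlib
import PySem

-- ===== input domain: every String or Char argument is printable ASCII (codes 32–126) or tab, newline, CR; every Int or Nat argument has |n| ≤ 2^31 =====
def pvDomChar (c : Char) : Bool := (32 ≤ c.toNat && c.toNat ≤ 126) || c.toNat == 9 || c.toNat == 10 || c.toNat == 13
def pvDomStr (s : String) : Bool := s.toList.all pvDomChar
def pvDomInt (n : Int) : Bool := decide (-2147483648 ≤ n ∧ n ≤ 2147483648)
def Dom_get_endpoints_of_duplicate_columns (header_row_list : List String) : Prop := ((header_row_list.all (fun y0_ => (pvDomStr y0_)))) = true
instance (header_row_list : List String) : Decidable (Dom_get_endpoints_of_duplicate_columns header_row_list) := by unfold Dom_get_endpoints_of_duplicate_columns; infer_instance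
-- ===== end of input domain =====

-- B replaces A's single-pass dict-of-first-indices loop with a sort-based algorithm:
-- sort the (index, header) pairs by (header, index) and pick the adjacent equal-header
-- pair with the smallest second index (objective: alternative).

-- ===== PORT A =====
-- the for-loop of A: state = (duplicate_col_dict, column_index); break returns immediately
def pvAGo (d : PySem.Dict String Int) (ci : Int) : List String → Int × Int
  | [] => (0, 0)
  | h :: t =>
    if d.contains h = false then
      pvAGo (d.insert h ci) (ci + 1) t
    else
      ((d.get? h).getD 0, ci - 1)

def get_endpoints_of_duplicate_columns (header_row_list : List String) : Int × Int :=
  pvAGo PySem.Dict.empty 0 header_row_list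

-- ===== PORT B =====
-- body of B's for-loop over zip(pairs, pairs[1:]): best is updated when the two headers
-- are equal and (best is None or j < best[1])
def pvStep (best : Option (Int × Int)) (q : (Int × String) × (Int × String)) : Option (Int × Int) :=
  if q.1.2 == q.2.2 && (match best with | none => true | some b => decide (q.2.1 < b.2)) then
    some (q.1.1, q.2.1)
  else best

def get_endpoints_of_duplicate_columns_alt (header_row_list : List String) : Int × Int :=
  -- pairs = sorted(enumerate(header_row_list), key=lambda p: (p[1], p[0]))
  let pairs := PySem.List.sorted2 (PySem.List.enumerate header_row_list) (fun p => p.2) (fun p => p.1)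
  match (pairs.zip (PySem.List.slice pairs (some 1) none)).foldl pvStep none with
  | none => (0, 0)
  | some b => (b.1, b.2 - 1)

-- ===== PRECONDITION & SPEC =====
def Spec_get_endpoints_of_duplicate_columns (header_row_list : List String) (out : Int × Int) : Prop := out = get_endpoints_of_duplicate_columns_alt header_row_list
instance (header_row_list : List String) (out : Int × Int) : Decidable (Spec_get_endpoints_of_duplicate_columns header_row_list out) := by unfold Spec_get_endpoints_of_duplicate_columns; infer_instance

-- ===== CLAIM (what is proved, stated in full; the proofs are below) =====
def Claim_equal_get_endpoints_of_duplicate_columns : Prop := ∀ (header_row_list : List String), Dom_get_endpoints_of_duplicate_columns header_row_list → Spec_get_endpoints_of_duplicate_columns header_row_list (get_endpoints_of_duplicate_columns header_row_list)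

-- ===== LEMMAS AND PROOFS =====

-- proof-side reference scan: find the first index holding h in pre (offset j)
def pvScanFind : List String → String → Int → Option Int
  | [], _, _ => none
  | p :: ps, h, j => if p == h then some j else pvScanFind ps h (j + 1)

-- proof-side reference scan: first element of rest already seen in pre
def pvScanGo (pre : List String) (i : Int) : List String → Int × Int
  | [] => (0, 0)
  | h :: t =>
    match pvScanFind pre h 0 with
    | some j => (j, i - 1)
    | none => pvScanGo (pre ++ [h]) (i + 1) t

-- element access used by the proofs only
def pvElem (hs : List String) (k : Nat) : String := hs.getD k ""

-- "position i holds a header already seen strictly earlier"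
def pvDupAt (hs : List String) (i : Nat) : Prop :=
  ∃ j, j < i ∧ pvElem hs j = pvElem hs i

-- strict lexicographic order (header, then index) used to read off the sorted list
def pvLexLT (a b : Int × String) : Prop := a.2 < b.2 ∨ (a.2 = b.2 ∧ a.1 < b.1)

lemma pvElem_eq (hs : List String) (k : Nat) (h : k < hs.length) : pvElem hs k = hs[k] := by
  simp [pvElem, h]

lemma pvScanFind_append (pre : List String) (h h' : String) (j : Int) :
    pvScanFind (pre ++ [h]) h' j =
      (pvScanFind pre h' j).or (if h == h' then some (j + pre.length) else none) := by
  induction pre generalizing j with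
  | nil => simp [pvScanFind]
  | cons p ps ih =>
      simp only [List.cons_append, pvScanFind]
      by_cases hp : p == h'
      · simp [hp]
      · simp only [hp, ih (j + 1), List.length_cons]
        push_cast
        ring_nf

lemma pvMain (rest : List String) : ∀ (d : PySem.Dict String Int) (pre : List String),
    (∀ h, d.get? h = pvScanFind pre h 0) →
    pvAGo d (pre.length : Int) rest = pvScanGo pre (pre.length : Int) rest := by
  induction rest with
  | nil => intro d pre _; rfl
  | cons h t ih =>
      intro d pre hinv
      have hc : d.contains h = (pvScanFind pre h 0).isSome := by
        rw [PySem.Dict.contains_eq_isSome_get?, hinv h]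
      simp only [pvAGo, pvScanGo]
      cases hs : pvScanFind pre h 0 with
      | some j =>
          rw [hc, hs]
          simp [hinv h, hs]
      | none =>
          rw [hc, hs]
          simp only [Option.isSome_none]
          rw [if_pos trivial]
          have hlen : ((pre ++ [h]).length : Int) = (pre.length : Int) + 1 := by
            push_cast [List.length_append, List.length_cons]; simp
          have := ih (d.insert h (pre.length : Int)) (pre ++ [h]) ?_
          · rw [hlen] at this; exact this
          · intro h'
            rw [PySem.Dict.get?_insert, pvScanFind_append, hinv h']
            by_cases he : h' = h
            · subst he; rw [hs]; simp
            · have hne : (h == h') = false := by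
                rw [beq_eq_false_iff_ne]; exact fun e => he e.symm
              simp [he, hne]

lemma pvScanFind_not_mem (pre : List String) (h : String) (j : Int) (hn : h ∉ pre) :
    pvScanFind pre h j = none := by
  induction pre generalizing j with
  | nil => rfl
  | cons p ps ih =>
      simp only [List.mem_cons, not_or] at hn
      have : (p == h) = false := by rw [beq_eq_false_iff_ne]; exact fun e => hn.1 e.symm
      simp [pvScanFind, this, ih _ hn.2]

lemma pvScanFind_first (pre : List String) (h : String) (k : Nat) (j : Int)
    (hk : k < pre.length) (hfirst : ∀ l (_ : l < k), pre[l]'(by omega) ≠ h) (hhit : pre[k] = h) :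
    pvScanFind pre h j = some (j + k) := by
  induction pre generalizing k j with
  | nil => simp at hk
  | cons p ps ih =>
      cases k with
      | zero =>
          simp only [List.getElem_cons_zero] at hhit
          simp [pvScanFind, hhit]
      | succ k' =>
          have hp : (p == h) = false := by
            rw [beq_eq_false_iff_ne]
            exact hfirst 0 (by omega)
          simp only [pvScanFind, hp, Bool.false_eq_true, if_false]
          have := ih (k := k') (j := j + 1) (by simpa using hk)
            (fun l hl => by simpa using hfirst (l + 1) (by omega))
            (by simpa using hhit)
          rw [this]
          congr 1
          push_cast
          ring

lemma pvScanGo_nodup : ∀ (rest pre : List String) (i : Int),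
    (pre ++ rest).Nodup → pvScanGo pre i rest = (0, 0) := by
  intro rest
  induction rest with
  | nil => intro pre i _; rfl
  | cons h t ih =>
      intro pre i hnd
      have hn : h ∉ pre := by
        intro hmem
        have := List.disjoint_of_nodup_append hnd
        exact this hmem (by simp)
      simp only [pvScanGo, pvScanFind_not_mem pre h 0 hn]
      apply ih
      have : pre ++ [h] ++ t = pre ++ h :: t := by simp
      rw [this]
      exact hnd

-- the scan on take m / drop m, below the first duplicate i₀, yields (j₀, i₀ - 1)
lemma pvScanGo_dup (hs : List String) (i₀ j₀ : Nat)
    (hi₀ : i₀ < hs.length) (hj₀ : j₀ < i₀)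
    (heq : pvElem hs j₀ = pvElem hs i₀)
    (hmin_i : ∀ k, k < i₀ → ¬ pvDupAt hs k)
    (hmin_j : ∀ j, j < j₀ → pvElem hs j ≠ pvElem hs i₀) :
    ∀ dfuel m, m ≤ i₀ → i₀ - m = dfuel →
      pvScanGo (hs.take m) (m : Int) (hs.drop m) = ((j₀ : Int), (i₀ : Int) - 1) := by
  intro dfuel
  induction dfuel with
  | zero =>
      intro m hm hd
      have hmi : m = i₀ := by omega
      rw [hmi]
      rw [List.drop_eq_getElem_cons hi₀]
      have hlen : (hs.take i₀).length = i₀ := by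
        simp [List.length_take]
        omega
      have hfind : pvScanFind (hs.take i₀) hs[i₀] 0 = some ((0 : Int) + j₀) := by
        apply pvScanFind_first (k := j₀) (hk := by omega)
        · intro l hl
          rw [List.getElem_take]
          have := hmin_j l (by omega)
          rwa [pvElem_eq hs l (by omega), pvElem_eq hs i₀ hi₀] at this
        · rw [List.getElem_take]
          have := heq
          rwa [pvElem_eq hs j₀ (by omega), pvElem_eq hs i₀ hi₀] at this
      simp [pvScanGo, hfind]
  | succ d ih =>
      intro m hm hd
      have hmlt : m < i₀ := by omega
      have hmn : m < hs.length := by omega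
      rw [List.drop_eq_getElem_cons hmn]
      have hnm : hs[m] ∉ hs.take m := by
        intro hmem
        rcases List.mem_iff_getElem.mp hmem with ⟨l, hl, hle⟩
        have hl' : l < m := by
          have := hl
          simp only [List.length_take] at this
          omega
        apply hmin_i m hmlt
        refine ⟨l, hl', ?_⟩
        rw [List.getElem_take] at hle
        rw [pvElem_eq hs l (by omega), pvElem_eq hs m hmn, hle]
      simp only [pvScanGo, pvScanFind_not_mem _ _ 0 hnm]
      have htake : hs.take m ++ [hs[m]] = hs.take (m + 1) := by
        rw [List.take_add_one]
        simp [List.getElem?_eq_getElem hmn]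
      have hcast : ((m : Int) + 1) = ((m + 1 : Nat) : Int) := by push_cast; ring
      rw [htake, hcast]
      exact ih (m + 1) (by omega) (by omega)

-- ===== sort-side lemmas =====

-- pvStep leaves best unchanged when no pair of equal headers occurs
lemma pvFold_stay (Z : List ((Int × String) × (Int × String))) (b : Int × Int)
    (h : ∀ q ∈ Z, (q.1.2 == q.2.2) = true → ¬ (q.2.1 < b.2)) :
    Z.foldl pvStep (some b) = some b := by
  induction Z with
  | nil => rfl
  | cons q t ih =>
      have hq : pvStep (some b) q = some b := by
        unfold pvStep
        by_cases he : (q.1.2 == q.2.2) = true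
        · have := h q (by simp) he
          simp [he, this]
        · simp [he]
      rw [List.foldl_cons, hq]
      exact ih (fun q' hq' => h q' (by simp [hq']))

lemma pvFold_none (Z : List ((Int × String) × (Int × String)))
    (h : ∀ q ∈ Z, (q.1.2 == q.2.2) = false) :
    Z.foldl pvStep none = none := by
  induction Z with
  | nil => rfl
  | cons q t ih =>
      have hq : pvStep none q = none := by
        unfold pvStep; simp [h q (by simp)]
      rw [List.foldl_cons, hq]
      exact ih (fun q' hq' => h q' (by simp [hq']))

-- running min by second component: the unique minimal matched pair wins
lemma pvFold_min : ∀ (Z : List ((Int × String) × (Int × String))) (c : Int × Int),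
    (∃ q ∈ Z, (q.1.2 == q.2.2) = true ∧ (q.1.1, q.2.1) = c) →
    (∀ q ∈ Z, (q.1.2 == q.2.2) = true → (q.1.1, q.2.1) = c ∨ c.2 < q.2.1) →
    ∀ acc : Option (Int × Int), (acc = none ∨ ∃ b, acc = some b ∧ c.2 < b.2) →
    Z.foldl pvStep acc = some c := by
  intro Z
  induction Z with
  | nil => rintro c ⟨q, hq, _⟩ _ _ _; simp at hq
  | cons q t ih =>
      rintro c hex hmin acc hacc
      by_cases he : (q.1.2 == q.2.2) = true
      · rcases hmin q (by simp) he with hc | hlt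
        · -- q is the winner: acc becomes some c and stays
          have hqs : pvStep acc q = some c := by
            unfold pvStep
            rcases hacc with h0 | ⟨b, hb, hbl⟩
            · subst h0; simp [he, hc]
            · subst hb
              have hc2 : c.2 = q.2.1 := by rw [← hc]
              have hql : q.2.1 < b.2 := by omega
              simp [he, hql, hc]
          rw [List.foldl_cons, hqs]
          apply pvFold_stay
          intro q' hq' he'
          rcases hmin q' (by simp [hq']) he' with hc' | hlt'
          · have : q'.2.1 = c.2 := by rw [← hc']
            omega
          · omega
        · -- q matched but is not the minimum
          have hqc : (q.1.1, q.2.1) ≠ c := by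
            intro hcc
            have hc2 : c.2 = q.2.1 := by rw [← hcc]
            omega
          have hacc' : pvStep acc q = none ∨ ∃ b, pvStep acc q = some b ∧ c.2 < b.2 := by
            unfold pvStep
            rcases hacc with h0 | ⟨b, hb, hbl⟩
            · subst h0
              right; exact ⟨(q.1.1, q.2.1), by simp [he], hlt⟩
            · subst hb
              by_cases hless : q.2.1 < b.2
              · right; exact ⟨(q.1.1, q.2.1), by simp [he, hless], hlt⟩
              · right
                refine ⟨b, ?_, hbl⟩
                simp [he, hless]
          rcases hex with ⟨q', hq', he', hc'⟩
          have hqt : q' ∈ t := by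
            rcases List.mem_cons.mp hq' with h1 | h1
            · exfalso; cases h1; exact hqc hc'
            · exact h1
          rw [List.foldl_cons]
          exact ih c ⟨q', hqt, he', hc'⟩ (fun q'' hq'' => hmin q'' (by simp [hq''])) _ hacc'
      · -- headers differ: acc unchanged
        have hqs : pvStep acc q = acc := by unfold pvStep; simp [he]
        rcases hex with ⟨q', hq', he', hc'⟩
        have hqt : q' ∈ t := by
          rcases List.mem_cons.mp hq' with h1 | h1
          · exfalso; rw [h1] at he'; exact he (by exact he')
          · exact h1
        rw [List.foldl_cons, hqs]
        exact ih c ⟨q', hqt, he', hc'⟩ (fun q'' hq'' => hmin q'' (by simp [hq''])) acc hacc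

-- adjacency in l ↔ membership in zip(l, l.tail)
lemma pvMem_zip_tail {α : Type} : ∀ (l : List α) (x y : α),
    (x, y) ∈ l.zip l.tail → ∃ p, ∃ _ : p + 1 < l.length, l[p] = x ∧ l[p+1] = y := by
  intro l
  induction l with
  | nil => intro x y h; simp at h
  | cons a t ih =>
      intro x y h
      cases t with
      | nil => simp at h
      | cons b t' =>
          simp only [List.tail_cons, List.zip_cons_cons, List.mem_cons] at h
          rcases h with h | h
          · rw [Prod.mk.injEq] at h
            obtain ⟨rfl, rfl⟩ := h
            exact ⟨0, by simp, by simp, by simp⟩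
          · have h' : (x, y) ∈ (b :: t').zip (b :: t').tail := by simpa using h
            rcases ih x y h' with ⟨p, hp, h1, h2⟩
            exact ⟨p + 1, by simpa using hp, by simpa using h1, by simpa using h2⟩

lemma pvZip_tail_mem {α : Type} : ∀ (l : List α) (p : Nat) (hp : p + 1 < l.length),
    (l[p], l[p+1]) ∈ l.zip l.tail := by
  intro l
  induction l with
  | nil => intro p hp; simp at hp
  | cons a t ih =>
      intro p hp
      cases t with
      | nil => simp at hp
      | cons b t' =>
          cases p with
          | zero => simp
          | succ p' =>
              have := ih p' (by simpa using hp)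
              simp only [List.tail_cons, List.zip_cons_cons, List.mem_cons]
              right
              simpa using this

lemma pvIdx {α : Type} (l : List α) {i j : Nat} (h : i = j) (hj : j < l.length) :
    l[i]'(by omega) = l[j] := by subst h; rfl

lemma pvLexLT_asymm {a b : Int × String} (h : pvLexLT a b) : ¬ pvLexLT b a := by
  rcases h with h | ⟨he, hl⟩
  · rintro (h' | ⟨he', _⟩)
    · exact absurd h' (lt_asymm h)
    · rw [he'] at h; exact lt_irrefl _ h
  · rintro (h' | ⟨_, hl'⟩)
    · rw [he] at h'; exact lt_irrefl _ h'
    · omega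

-- the sorted2 call of the port, read as a sort by the strict lexicographic key
lemma pvSorted2_eq (xs : List (Int × String)) :
    PySem.List.sorted2 xs (fun p => p.2) (fun p => p.1) =
      PySem.List.sorted xs (fun p => (toLex (p.2, p.1) : String ×ₗ Int)) := by
  have hbefore : (fun (a b : Int × String) =>
        decide (a.2 < b.2) || (!decide (b.2 < a.2) && decide (a.1 < b.1)))
      = (fun (a b : Int × String) =>
        decide ((toLex ((a.2, a.1) : String × Int) : String ×ₗ Int) < toLex (b.2, b.1))) := by
    funext a b
    rw [Bool.eq_iff_iff]
    simp only [Bool.or_eq_true, Bool.and_eq_true, Bool.not_eq_true', decide_eq_true_eq,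
      decide_eq_false_iff_not, Prod.Lex.lt_iff, ofLex_toLex]
    rcases lt_trichotomy a.2 b.2 with h | h | h
    · simp [h]
    · simp [h]
    · simp [h, lt_asymm h, ne_of_gt h]
  change xs.foldl (fun acc x => PySem.List.insertBy
      (fun (a b : Int × String) =>
        decide (a.2 < b.2) || (!decide (b.2 < a.2) && decide (a.1 < b.1))) x acc) [] =
    xs.foldl (fun acc x => PySem.List.insertBy
      (fun (a b : Int × String) =>
        decide ((toLex ((a.2, a.1) : String × Int) : String ×ₗ Int) < toLex (b.2, b.1))) x acc) []
  rw [hbefore]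

-- the sorted list is pairwise strictly increasing for pvLexLT
lemma pvSorted_pairwise (hs : List String) :
    List.Pairwise pvLexLT
      (PySem.List.sorted2 (PySem.List.enumerate hs) (fun p => p.2) (fun p => p.1)) := by
  rw [pvSorted2_eq]
  set key : Int × String → String ×ₗ Int := fun p => (toLex (p.2, p.1) : String ×ₗ Int) with hkey
  have hle : List.Pairwise (fun a b => key a ≤ key b)
      (PySem.List.sorted (PySem.List.enumerate hs) key) :=
    PySem.List.sorted_pairwise _ _
  have hnodupE : (PySem.List.enumerate hs).Nodup := by
    have := PySem.List.pairwise_lt_enumerate hs 0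
    exact this.imp (fun {p q} h => by intro hpq; rw [hpq] at h; exact lt_irrefl _ h)
  have hnodup : (PySem.List.sorted (PySem.List.enumerate hs) key).Nodup :=
    ((PySem.List.sorted_perm (PySem.List.enumerate hs) key false).nodup_iff).mpr hnodupE
  have := hle.and hnodup
  refine this.imp ?_
  rintro p q ⟨hle', hne⟩
  have hkne : key p ≠ key q := by
    intro hk
    apply hne
    have h1 : (p.2, p.1) = (q.2, q.1) := by
      have := congrArg (ofLex) hk
      simpa [hkey] using this
    have e2 : p.2 = q.2 := congrArg Prod.fst h1
    have e1 : p.1 = q.1 := congrArg Prod.snd h1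
    exact Prod.ext e1 e2
  have hlt : key p < key q := lt_of_le_of_ne hle' hkne
  rw [hkey] at hlt
  rw [Prod.Lex.lt_iff] at hlt
  exact hlt

-- membership in the sorted list, read back as positions of hs
lemma pvSorted_mem (hs : List String) (x : Int × String) :
    x ∈ PySem.List.sorted2 (PySem.List.enumerate hs) (fun p => p.2) (fun p => p.1) ↔
      ∃ k : Nat, ∃ _ : k < hs.length, x = ((k : Int), hs[k]) := by
  rw [pvSorted2_eq]
  rw [(PySem.List.sorted_perm (PySem.List.enumerate hs) _ false).mem_iff]
  rw [PySem.List.mem_enumerate_iff]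
  constructor
  · rintro ⟨k, hk, hx⟩; exact ⟨k, hk, by simpa using hx⟩
  · rintro ⟨k, hk, hx⟩; exact ⟨k, hk, by simpa using hx⟩

-- ===== assembling the two sides =====

lemma pvAlt_eq_match (hs : List String) :
    get_endpoints_of_duplicate_columns_alt hs =
      (match (PySem.List.sorted2 (PySem.List.enumerate hs) (fun p => p.2) (fun p => p.1)).zip
          (PySem.List.sorted2 (PySem.List.enumerate hs) (fun p => p.2) (fun p => p.1)).tail
          |>.foldl pvStep none with
        | none => ((0 : Int), (0 : Int))
        | some b => (b.1, b.2 - 1)) := by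
  unfold get_endpoints_of_duplicate_columns_alt
  simp only [PySem.List.slice_from_one]

-- no duplicate: B returns (0, 0)
lemma pvAlt_nodup (hs : List String) (hnd : hs.Nodup) :
    get_endpoints_of_duplicate_columns_alt hs = (0, 0) := by
  rw [pvAlt_eq_match]
  set L := PySem.List.sorted2 (PySem.List.enumerate hs) (fun p => p.2) (fun p => p.1) with hL
  have hpw : List.Pairwise pvLexLT L := pvSorted_pairwise hs
  have hfold : (L.zip L.tail).foldl pvStep none = none := by
    apply pvFold_none
    intro q hq
    rcases pvMem_zip_tail L q.1 q.2 (by simpa using hq) with ⟨p, hp, h1, h2⟩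
    have hlex : pvLexLT q.1 q.2 := by
      have h := List.pairwise_iff_getElem.mp hpw p (p+1) (by omega) hp (by omega)
      rwa [h1, h2] at h
    rw [beq_eq_false_iff_ne]
    intro heq
    rcases hlex with h | ⟨_, hlt⟩
    · rw [heq] at h; exact lt_irrefl _ h
    · -- equal headers at distinct positions contradict Nodup hs
      have hmem : ∀ x, x ∈ L ↔ ∃ k : Nat, ∃ _ : k < hs.length, x = ((k : Int), hs[k]) :=
        fun x => pvSorted_mem hs x
      rcases (hmem q.1).mp (by rw [← h1]; exact List.getElem_mem _) with ⟨kx, hkx, hx⟩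
      rcases (hmem q.2).mp (by rw [← h2]; exact List.getElem_mem _) with ⟨ky, hky, hy⟩
      have hxy : hs[kx] = hs[ky] := by
        have e1 : q.1.2 = hs[kx] := by rw [hx]
        have e2 : q.2.2 = hs[ky] := by rw [hy]
        rw [← e1, ← e2, heq]
      have : kx = ky := (hnd.getElem_inj_iff).mp hxy
      have e1 : q.1.1 = (kx : Int) := by rw [hx]
      have e2 : q.2.1 = (ky : Int) := by rw [hy]
      rw [e1, e2, this] at hlt
      exact lt_irrefl _ hlt
  rw [hfold]

-- with a first duplicate at i₀ (first occurrence j₀): B returns (j₀, i₀ - 1)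
lemma pvAlt_dup (hs : List String) (i₀ j₀ : Nat)
    (hi₀ : i₀ < hs.length) (hj₀ : j₀ < i₀)
    (heq : pvElem hs j₀ = pvElem hs i₀)
    (hmin_i : ∀ k, k < i₀ → ¬ pvDupAt hs k) :
    get_endpoints_of_duplicate_columns_alt hs = ((j₀ : Int), (i₀ : Int) - 1) := by
  rw [pvAlt_eq_match]
  set L := PySem.List.sorted2 (PySem.List.enumerate hs) (fun p => p.2) (fun p => p.1) with hL
  have hpw : List.Pairwise pvLexLT L := pvSorted_pairwise hs
  have hmem : ∀ x, x ∈ L ↔ ∃ k : Nat, ∃ _ : k < hs.length, x = ((k : Int), hs[k]) :=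
    fun x => pvSorted_mem hs x
  have hj₀n : j₀ < hs.length := by omega
  have hv : hs[j₀] = hs[i₀] := by
    rwa [pvElem_eq hs j₀ hj₀n, pvElem_eq hs i₀ hi₀] at heq
  -- the two distinguished elements of L
  have hbmem : ((i₀ : Int), hs[i₀]) ∈ L := (hmem _).mpr ⟨i₀, hi₀, rfl⟩
  have hamem : ((j₀ : Int), hs[j₀]) ∈ L := (hmem _).mpr ⟨j₀, hj₀n, rfl⟩
  rcases List.getElem_of_mem hbmem with ⟨p₂, hp₂, hb⟩
  rcases List.getElem_of_mem hamem with ⟨p₁, hp₁, ha⟩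
  have hlexab : pvLexLT ((j₀ : Int), hs[j₀]) ((i₀ : Int), hs[i₀]) := by
    right
    refine ⟨hv, ?_⟩
    show (j₀ : Int) < (i₀ : Int)
    exact_mod_cast hj₀
  have hp₁₂ : p₁ < p₂ := by
    rcases Nat.lt_trichotomy p₁ p₂ with h | h | h
    · exact h
    · exfalso
      have hee : (((j₀ : Int), hs[j₀]) : Int × String) = ((i₀ : Int), hs[i₀]) := by
        rw [← ha, ← hb]
        exact pvIdx L h hp₂
      have : (j₀ : Int) = (i₀ : Int) := congrArg Prod.fst hee
      omega
    · exfalso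
      have := List.pairwise_iff_getElem.mp hpw p₂ p₁ hp₂ hp₁ h
      rw [ha, hb] at this
      exact pvLexLT_asymm hlexab this
  -- adjacency: p₁ + 1 = p₂
  have hadj : p₁ + 1 = p₂ := by
    by_contra hne
    have hlt : p₁ + 1 < p₂ := by omega
    have hz : L[p₂ - 1] ∈ L := List.getElem_mem _
    rcases (hmem _).mp hz with ⟨kz, hkz, hzv⟩
    have h1 : pvLexLT ((j₀ : Int), hs[j₀]) L[p₂ - 1] := by
      have := List.pairwise_iff_getElem.mp hpw p₁ (p₂ - 1) hp₁ (by omega) (by omega)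
      rw [ha] at this; exact this
    have h2 : pvLexLT L[p₂ - 1] ((i₀ : Int), hs[i₀]) := by
      have := List.pairwise_iff_getElem.mp hpw (p₂ - 1) p₂ (by omega) hp₂ (by omega)
      rw [hb] at this; exact this
    rw [hzv] at h1 h2
    simp only [pvLexLT] at h1 h2
    have hzv2 : hs[kz] = hs[i₀] := by
      rcases h1 with h1 | ⟨h1e, _⟩
      · rcases h2 with h2 | ⟨h2e, _⟩
        · rw [hv] at h1; exact absurd (lt_trans h1 h2) (lt_irrefl _)
        · exact h2e
      · rcases h2 with h2 | ⟨h2e, _⟩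
        · rw [← h1e, hv] at h2; exact absurd h2 (lt_irrefl _)
        · exact h2e
    have hkzj : (j₀ : Int) < (kz : Int) := by
      rcases h1 with h1 | ⟨_, h1l⟩
      · rw [hv, hzv2] at h1; exact absurd h1 (lt_irrefl _)
      · exact h1l
    have hkzi : (kz : Int) < (i₀ : Int) := by
      rcases h2 with h2 | ⟨_, h2l⟩
      · rw [hzv2] at h2; exact absurd h2 (lt_irrefl _)
      · exact h2l
    apply hmin_i kz (by exact_mod_cast hkzi)
    refine ⟨j₀, by exact_mod_cast hkzj, ?_⟩
    rw [pvElem_eq hs j₀ hj₀n, pvElem_eq hs kz hkz, hv, hzv2]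
  -- the winning zip entry
  have hqmem : ((((j₀ : Int), hs[j₀]), ((i₀ : Int), hs[i₀])) :
      (Int × String) × (Int × String)) ∈ L.zip L.tail := by
    have hmain := pvZip_tail_mem L p₁ (by omega)
    rw [ha] at hmain
    have hb' : L[p₁ + 1]'(by omega) = ((i₀ : Int), hs[i₀]) := by
      rw [pvIdx L hadj hp₂]
      exact hb
    rw [hb'] at hmain
    exact hmain
  have hfold : (L.zip L.tail).foldl pvStep none = some ((j₀ : Int), (i₀ : Int)) := by
    apply pvFold_min
    · refine ⟨_, hqmem, ?_, rfl⟩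
      simp [hv]
    · intro q hq he
      rcases pvMem_zip_tail L q.1 q.2 (by simpa using hq) with ⟨p, hp, h1, h2⟩
      rcases (hmem q.1).mp (by rw [← h1]; exact List.getElem_mem _) with ⟨kx, hkx, hx⟩
      rcases (hmem q.2).mp (by rw [← h2]; exact List.getElem_mem _) with ⟨ky, hky, hy⟩
      have hlex : pvLexLT q.1 q.2 := by
        have := List.pairwise_iff_getElem.mp hpw p (p+1) (by omega) hp (by omega)
        rw [h1, h2] at this; exact this
      have hheq : hs[kx] = hs[ky] := by
        have e1 : q.1.2 = hs[kx] := by rw [hx]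
        have e2 : q.2.2 = hs[ky] := by rw [hy]
        rw [← e1, ← e2]; exact eq_of_beq he
      have hkxy : kx < ky := by
        rcases hlex with h | ⟨_, hl⟩
        · exfalso
          have e1 : q.1.2 = hs[kx] := by rw [hx]
          have e2 : q.2.2 = hs[ky] := by rw [hy]
          rw [e1, e2, hheq] at h
          exact lt_irrefl _ h
        · have e1 : q.1.1 = (kx : Int) := by rw [hx]
          have e2 : q.2.1 = (ky : Int) := by rw [hy]
          rw [e1, e2] at hl
          exact_mod_cast hl
      have hdup : pvDupAt hs ky := by
        refine ⟨kx, hkxy, ?_⟩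
        rw [pvElem_eq hs kx hkx, pvElem_eq hs ky hky, hheq]
      have hkyi : i₀ ≤ ky := by
        by_contra hlt'
        exact hmin_i ky (by omega) hdup
      rcases Nat.eq_or_lt_of_le hkyi with hkye | hkyl
      · -- q coincides with the winning entry
        left
        have hyb : q.2 = ((i₀ : Int), hs[i₀]) := by subst hkye; exact hy
        have : L[p+1] = L[p₂] := by rw [h2, hyb, hb]
        have hpp : p + 1 = p₂ := by
          have hnodup : L.Nodup := by
            rw [hL, pvSorted2_eq]
            exact ((PySem.List.sorted_perm _ _ false).nodup_iff).mpr
              ((PySem.List.pairwise_lt_enumerate hs 0).imp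
                (fun {p q} h => by intro hpq; rw [hpq] at h; exact lt_irrefl _ h))
          exact (hnodup.getElem_inj_iff).mp this
        have hpe : p = p₁ := by omega
        have hxa : q.1 = ((j₀ : Int), hs[j₀]) := by
          rw [← h1, pvIdx L hpe hp₁]
          exact ha
        rw [hxa, hyb]
      · right
        have e2 : q.2.1 = (ky : Int) := by rw [hy]
        show ((j₀ : Int), (i₀ : Int)).2 < q.2.1
        rw [e2]
        show (i₀ : Int) < (ky : Int)
        exact_mod_cast hkyl
    · exact Or.inl rfl
  rw [hfold]

-- Nodup ↔ no position duplicates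
lemma pvNodup_iff (hs : List String) :
    hs.Nodup ↔ ∀ i, i < hs.length → ¬ pvDupAt hs i := by
  constructor
  · intro hnd i hi hdup
    rcases hdup with ⟨j, hji, hje⟩
    have hj : j < hs.length := by omega
    have hje' : hs[j] = hs[i] := by rwa [pvElem_eq hs j hj, pvElem_eq hs i hi] at hje
    have := (hnd.getElem_inj_iff).mp hje'
    omega
  · intro h
    rw [List.nodup_iff_injective_getElem]
    rintro ⟨a, ha⟩ ⟨b, hb⟩ hab
    simp only at hab
    rcases Nat.lt_trichotomy a b with hl | hl | hl
    · exact absurd (⟨a, hl, by rw [pvElem_eq hs a ha, pvElem_eq hs b hb, hab]⟩ : pvDupAt hs b)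
        (h b hb)
    · exact Fin.ext hl
    · exact absurd (⟨b, hl, by rw [pvElem_eq hs b hb, pvElem_eq hs a ha]; exact hab.symm⟩ : pvDupAt hs a)
        (h a ha)

-- ===== VERDICT (by name: the statement is the Claim_ definition above) =====
theorem get_endpoints_of_duplicate_columns_spec : Claim_equal_get_endpoints_of_duplicate_columns := by
  intro hs _
  show get_endpoints_of_duplicate_columns hs = get_endpoints_of_duplicate_columns_alt hs
  have hA : get_endpoints_of_duplicate_columns hs = pvScanGo [] 0 hs := by
    have := pvMain hs PySem.Dict.empty [] (fun h => by simp [pvScanFind])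
    simpa [get_endpoints_of_duplicate_columns] using this
  by_cases hdup : ∃ i, i < hs.length ∧ ((List.range i).any (fun j => pvElem hs j == pvElem hs i)) = true
  · -- a duplicate exists; extract the least i₀ and its least j₀
    classical
    have hi := Nat.find_spec hdup
    set i₀ := Nat.find hdup with hi₀def
    obtain ⟨hi₀n, hi₀any⟩ := hi
    have hj : ∃ j, (pvElem hs j == pvElem hs i₀) = true := by
      rcases List.any_eq_true.mp hi₀any with ⟨j, _, hj⟩
      exact ⟨j, hj⟩
    have hjspec := Nat.find_spec hj
    set j₀ := Nat.find hj with hj₀def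
    have heq : pvElem hs j₀ = pvElem hs i₀ := eq_of_beq hjspec
    have hj₀lt : j₀ < i₀ := by
      rcases List.any_eq_true.mp hi₀any with ⟨j, hjr, hje⟩
      have := Nat.find_min' hj hje
      have hjlt : j < i₀ := List.mem_range.mp hjr
      omega
    have hmin_i : ∀ k, k < i₀ → ¬ pvDupAt hs k := by
      intro k hk ⟨j, hjk, hje⟩
      by_cases hkn : k < hs.length
      · apply Nat.find_min hdup hk
        exact ⟨hkn, List.any_eq_true.mpr ⟨j, List.mem_range.mpr hjk, beq_iff_eq.mpr hje⟩⟩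
      · -- k ≥ hs.length contradicts k < i₀ < hs.length
        omega
    have hmin_j : ∀ j, j < j₀ → pvElem hs j ≠ pvElem hs i₀ := by
      intro j hjlt hje
      exact Nat.find_min hj hjlt (beq_iff_eq.mpr hje)
    have hScan := pvScanGo_dup hs i₀ j₀ hi₀n hj₀lt heq hmin_i hmin_j i₀ 0 (by omega) (by omega)
    simp only [List.take_zero, List.drop_zero, Nat.cast_zero] at hScan
    rw [hA, hScan, pvAlt_dup hs i₀ j₀ hi₀n hj₀lt heq hmin_i]
  · -- no duplicate
    have hnd : hs.Nodup := by
      rw [pvNodup_iff]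
      intro i hi ⟨j, hji, hje⟩
      exact hdup ⟨i, hi, List.any_eq_true.mpr ⟨j, List.mem_range.mpr hji, beq_iff_eq.mpr hje⟩⟩
    rw [hA, pvScanGo_nodup hs [] 0 (by simpa using hnd), pvAlt_nodup hs hnd]
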